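-- pv_equiv track=rewrite | github.com/Romcast/Ancien-projets | CHIFFRES ET LETTRES.py | comb2
-- ===== SOURCE A (Python) =====
-- def comb2(n,i):
--     """comb(entier1,entier2) -> liste   Renvoie l'ensemble des listes de taille n dont chaque élément est un élément d'une liste i"""
--     t=[]
--     if n == 1:
--         return [[n] for n in i]
--     for tab in comb2(n-1,i):
--         for operation in i:
--             t.append([operation] + tab)
--     return t
-- ===== SOURCE B (Python) =====
-- def comb2(n, i):
--     """comb(entier1,entier2) -> liste   Renvoie l'ensemble des listes de taille n dont chaque élément est un élément d'une liste i"""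
--     t = [[x] for x in i]
--     for _ in range(n - 1):
--         t = [[op] + tab for tab in t for op in i]
--     return t
-- ===== Notes on version B (the rewrite author's own statement) =====
-- stated objective: simpler
-- what changed: Replaces the recursion on n with an iterative bottom-up build: start from the singleton lists and apply one product step n-1 times in a loop; same output order, no recursion.
import Mathlib
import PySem

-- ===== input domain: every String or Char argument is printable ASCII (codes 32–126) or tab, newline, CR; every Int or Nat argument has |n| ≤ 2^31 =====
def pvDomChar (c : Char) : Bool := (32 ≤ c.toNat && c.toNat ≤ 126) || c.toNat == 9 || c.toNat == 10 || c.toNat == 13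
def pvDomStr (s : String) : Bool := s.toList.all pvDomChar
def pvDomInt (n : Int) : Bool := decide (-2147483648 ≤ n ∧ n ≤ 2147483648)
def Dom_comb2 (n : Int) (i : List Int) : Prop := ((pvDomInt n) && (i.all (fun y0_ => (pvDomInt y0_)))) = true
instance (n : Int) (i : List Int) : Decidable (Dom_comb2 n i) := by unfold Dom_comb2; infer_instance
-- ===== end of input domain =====

-- B replaces A's recursion on n with an iterative bottom-up build (same output order); objective: simpler.


-- ===== PORT A =====
-- Literal port of A's recursion; the `n ≤ 1` guard only makes the recursion total
-- (Python recurses forever there, which Pre_comb2 excludes).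
def comb2 (n : Int) (i : List Int) : List (List Int) :=
  if n = 1 then i.map (fun x => [x])
  else if h : n ≤ 1 then []
  else
    (comb2 (n - 1) i).foldl
      (fun t tab => i.foldl (fun t op => t ++ [[op] ++ tab]) t) []
termination_by n.toNat
decreasing_by omega

-- ===== PORT B =====
def comb2_alt (n : Int) (i : List Int) : List (List Int) :=
  (PySem.List.pyRange 0 (n - 1) 1).foldl
    (fun t _ => t.flatMap (fun tab => i.map (fun op => [op] ++ tab)))
    (i.map (fun x => [x]))

-- ===== PRECONDITION & SPEC =====
-- Pre_ excludes n ≤ 0, on which A recurses without a base case and raises RecursionError.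
def Pre_comb2 (n : Int) (i : List Int) : Prop := 1 ≤ n
instance (n : Int) (i : List Int) : Decidable (Pre_comb2 n i) := by unfold Pre_comb2; infer_instance
def pvWitness_comb2 : Int × List Int := (2, [1, 2, 3])

def Spec_comb2 (n : Int) (i : List Int) (out : List (List Int)) : Prop := out = comb2_alt n i
instance (n : Int) (i : List Int) (out : List (List Int)) : Decidable (Spec_comb2 n i out) := by unfold Spec_comb2; infer_instance

-- ===== CLAIM (what is proved, stated in full; the proofs are below) =====
def Claim_equal_comb2 : Prop := ∀ (n : Int) (i : List Int), Dom_comb2 n i → Pre_comb2 n i → Spec_comb2 n i (comb2 n i)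

-- ===== LEMMAS AND PROOFS =====

-- the one product step both ports perform per level
def pvStep (i : List Int) (t : List (List Int)) : List (List Int) :=
  t.flatMap (fun tab => i.map (fun op => [op] ++ tab))

-- A's inner loop appends i.map (fun op => [op] ++ tab)
theorem pvInner (i : List Int) (tab : List Int) (t : List (List Int)) :
    i.foldl (fun t op => t ++ [[op] ++ tab]) t = t ++ i.map (fun op => [op] ++ tab) := by
  induction i generalizing t with
  | nil => simp
  | cons a as ih => rw [List.foldl_cons, ih]; simp

-- A's outer loop is a flatMap
theorem pvOuter (i : List Int) (L : List (List Int)) (t : List (List Int)) :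
    L.foldl (fun t tab => i.foldl (fun t op => t ++ [[op] ++ tab]) t) t
      = t ++ pvStep i L := by
  induction L generalizing t with
  | nil => simp [pvStep]
  | cons tab L ih => rw [List.foldl_cons, pvInner, ih]; simp [pvStep]

-- folding a constant function over a range iterates it
theorem pvFoldConst (f : List (List Int) → List (List Int)) (L : List Int)
    (t : List (List Int)) :
    L.foldl (fun t _ => f t) t = f^[L.length] t := by
  induction L generalizing t with
  | nil => simp
  | cons a L ih => simp [List.foldl, ih, Function.iterate_succ_apply]

theorem pvAltIter (n : Int) (i : List Int) :
    comb2_alt n i = (pvStep i)^[(n - 1).toNat] (i.map (fun x => [x])) := by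
  have h := pvFoldConst (pvStep i) (PySem.List.pyRange 0 (n - 1) 1) (i.map (fun x => [x]))
  simp only [pvStep] at h
  rw [comb2_alt, h, PySem.List.length_pyRange_one]
  simp

theorem pvAEqIter (n : Int) (i : List Int) (h : 1 ≤ n) :
    comb2 n i = (pvStep i)^[(n - 1).toNat] (i.map (fun x => [x])) := by
  have hk : ∃ k : ℕ, n = 1 + (k : Int) := ⟨(n - 1).toNat, by omega⟩
  obtain ⟨k, rfl⟩ := hk
  induction k with
  | zero => simp [comb2]
  | succ m ih =>
    rw [comb2]
    rw [if_neg (by push_cast; omega), dif_neg (by push_cast; omega)]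
    have he : (1 : Int) + ((m + 1 : ℕ) : Int) - 1 = 1 + (m : Int) := by push_cast; ring
    rw [he, ih (by omega), pvOuter]
    have ht : ((1 : Int) + (m : Int)).toNat = ((1 : Int) + (m : Int) - 1).toNat + 1 := by omega
    rw [ht, Function.iterate_succ_apply']
    simp

-- ===== VERDICT (by name: the statement is the Claim_ definition above) =====
theorem comb2_spec : Claim_equal_comb2 := by
  intro n i _ hpre
  unfold Spec_comb2
  rw [pvAEqIter n i hpre, pvAltIter]
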